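-- pv_equiv track=rewrite | github.com/WoodOxen/tactics2d | .github/scripts/extract_changelog.py | format_release_notes
-- ===== SOURCE A (Python) =====
-- from typing import Dict, List, Optional
--
-- def format_release_notes(version: str, changes: Dict[str, List[str]]) -> str:
--     """Format changes for GitHub Release notes"""
--     if not changes:
--         return f"Release {version}"
--
--     sections_order = ["added", "changed", "fixed", "removed"]
--     output = [f"# Release {version}\n"]
--
--     for section in sections_order:
--         if section in changes and changes[section]:
--             section_title = section.capitalize()
--             output.append(f"## {section_title}")
--             for entry in changes[section]:
--                 output.append(f"- {entry}")
--             output.append("")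
--
--     return "\n".join(output).strip()
-- ===== SOURCE B (Python) =====
-- def format_release_notes(version: str, changes) -> str:
--     """Format changes for GitHub Release notes"""
--     if not changes:
--         return f"Release {version}"
--
--     def render(sections):
--         if not sections:
--             return ""
--         rest = render(sections[1:])
--         entries = changes.get(sections[0])
--         if not entries:
--             return rest
--         block = "## " + sections[0].capitalize()
--         for e in entries:
--             block += "\n- " + e
--         return "\n\n" + block + rest
--
--     return ("# Release " + version + render(["added", "changed", "fixed", "removed"])).strip()
-- ===== Notes on version B (the rewrite author's own statement) =====
-- stated objective: alternative
-- what changed: B renders the fixed section list recursively back-to-front into a single string by direct concatenation (no intermediate line/block lists and no join calls, no empty-string sentinels), stripping once at the end.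
import Mathlib
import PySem

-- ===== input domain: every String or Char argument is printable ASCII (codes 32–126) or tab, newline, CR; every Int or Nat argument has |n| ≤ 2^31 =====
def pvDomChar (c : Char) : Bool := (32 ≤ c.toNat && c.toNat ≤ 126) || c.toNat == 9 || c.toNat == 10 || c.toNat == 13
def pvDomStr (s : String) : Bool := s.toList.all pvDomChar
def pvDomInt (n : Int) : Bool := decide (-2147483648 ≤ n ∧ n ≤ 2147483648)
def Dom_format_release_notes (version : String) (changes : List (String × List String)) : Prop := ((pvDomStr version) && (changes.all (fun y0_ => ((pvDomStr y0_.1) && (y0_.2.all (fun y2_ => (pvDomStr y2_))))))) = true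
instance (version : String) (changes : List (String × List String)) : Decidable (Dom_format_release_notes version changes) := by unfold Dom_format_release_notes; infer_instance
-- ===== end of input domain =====

-- B renders the fixed section list recursively back-to-front into one string by direct
-- concatenation (no line/block lists, no joins, no sentinels), stripping once; objective: alternative decomposition, same cost.
-- Dict note: Python's dict argument is the association list 'changes' (first-match lookup via PySem.Dict).

-- ===== PORT A =====
-- exact port of str.capitalize on the ASCII domain: first char uppercased, the rest lowercased
def pyCapitalize (s : String) : String :=
  match s.toList with
  | [] => ""
  | c :: rest => String.ofList (PySem.Chars.upperChar c :: rest.map PySem.Chars.lowerChar)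

-- the body of A's 'for section in sections_order' loop
def stepA (d : PySem.Dict String (List String)) (out : List String) (s : String) : List String :=
  match d.get? s with
  | none => out
  | some entries =>
    if entries.isEmpty then out
    else (out ++ ["## " ++ pyCapitalize s]) ++ entries.map (fun e => "- " ++ e) ++ [""]

def format_release_notes (version : String) (changes : List (String × List String)) : String :=
  if changes.isEmpty then "Release " ++ version
  else
    let output : List String := ["# Release " ++ version ++ "\n"]
    let output := ["added", "changed", "fixed", "removed"].foldl (stepA (PySem.Dict.mk changes)) output
    PySem.Str.strip (PySem.Str.join "\n" output)

-- ===== PORT B =====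
-- B's inner recursion 'render': tail of the section list first, then this section's block
-- (built by the entry for-loop as a string fold), glued by direct concatenation
def renderB (d : PySem.Dict String (List String)) : List String → String
  | [] => ""
  | s :: rest =>
    let tail := renderB d rest
    match d.get? s with
    | none => tail
    | some es =>
      if es.isEmpty then tail
      else "\n\n" ++ es.foldl (fun b e => b ++ "\n- " ++ e) ("## " ++ pyCapitalize s) ++ tail

def format_release_notes_alt (version : String) (changes : List (String × List String)) : String :=
  if changes.isEmpty then "Release " ++ version
  else
    PySem.Str.strip ("# Release " ++ version ++
      renderB (PySem.Dict.mk changes) ["added", "changed", "fixed", "removed"])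

-- ===== PRECONDITION & SPEC =====
def Spec_format_release_notes (version : String) (changes : List (String × List String)) (out : String) : Prop := out = format_release_notes_alt version changes
instance (version : String) (changes : List (String × List String)) (out : String) : Decidable (Spec_format_release_notes version changes out) := by unfold Spec_format_release_notes; infer_instance

-- ===== CLAIM (what is proved, stated in full; the proofs are below) =====
def Claim_equal_format_release_notes : Prop := ∀ (version : String) (changes : List (String × List String)), Dom_format_release_notes version changes → Spec_format_release_notes version changes (format_release_notes version changes)

-- ===== LEMMAS AND PROOFS =====

theorem chars_join_append (sep : List Char) (ys : List (List Char)) (hy : ys ≠ []) :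
    ∀ (xs : List (List Char)) (x : List Char),
      PySem.Chars.join sep ((x :: xs) ++ ys)
        = PySem.Chars.join sep (x :: xs) ++ sep ++ PySem.Chars.join sep ys := by
  intro xs
  induction xs with
  | nil =>
    intro x
    cases ys with
    | nil => exact absurd rfl hy
    | cons b bs => simp [PySem.Chars.join_cons_cons, PySem.Chars.join_singleton]
  | cons x2 rest ih =>
    intro x
    have h1 : (x :: x2 :: rest) ++ ys = x :: ((x2 :: rest) ++ ys) := by simp
    rw [h1]
    have h2 : (x2 :: rest) ++ ys = x2 :: (rest ++ ys) := by simp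
    rw [h2, PySem.Chars.join_cons_cons, ← h2, ih, PySem.Chars.join_cons_cons]
    simp [List.append_assoc]

theorem str_join_append (sep : String) (xs ys : List String) (hx : xs ≠ []) (hy : ys ≠ []) :
    PySem.Str.join sep (xs ++ ys) = PySem.Str.join sep xs ++ sep ++ PySem.Str.join sep ys := by
  cases xs with
  | nil => exact absurd rfl hx
  | cons x rest =>
    apply String.toList_inj.mp
    simp only [PySem.Str.join, String.toList_append, String.toList_ofList, List.map_append,
      List.map_cons]
    have hy' : ys.map String.toList ≠ [] := by simp [hy]
    exact chars_join_append sep.toList (ys.map String.toList) hy' (rest.map String.toList) x.toList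

theorem str_join_singleton (sep : String) (x : String) : PySem.Str.join sep [x] = x := by
  apply String.toList_inj.mp
  simp [PySem.Str.join, PySem.Chars.join_singleton]

theorem str_join_cons (sep x : String) (ys : List String) (hy : ys ≠ []) :
    PySem.Str.join sep (x :: ys) = x ++ sep ++ PySem.Str.join sep ys := by
  have h := str_join_append sep [x] ys (by simp) hy
  simpa [str_join_singleton] using h

theorem chars_strip_append_nl (cs : List Char) :
    PySem.Chars.strip (cs ++ ['\n']) = PySem.Chars.strip cs := by
  have hnl : PySem.Chars.isspace '\n' = true := by decide
  unfold PySem.Chars.strip PySem.Chars.lstrip PySem.Chars.rstrip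
  rw [List.dropWhile_append]
  by_cases h : (List.dropWhile PySem.Chars.isspace cs).isEmpty
  · rw [List.isEmpty_iff] at h
    simp [h, hnl]
  · simp only [h, if_false, Bool.false_eq_true]
    rw [List.reverse_append]
    simp [hnl]

theorem str_strip_append_nl (s : String) :
    PySem.Str.strip (s ++ "\n") = PySem.Str.strip s := by
  apply String.toList_inj.mp
  simp only [PySem.Str.strip, String.toList_append, String.toList_ofList]
  have h : ("\n" : String).toList = ['\n'] := by decide
  rw [h, chars_strip_append_nl]

-- B's entry for-loop equals the '\n'-join of the title line with the '- ' lines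
theorem fold_entries (entries : List String) : ∀ start : String,
    entries.foldl (fun b e => b ++ "\n- " ++ e) start
      = PySem.Str.join "\n" (start :: entries.map (fun e => "- " ++ e)) := by
  induction entries with
  | nil => intro start; simp [str_join_singleton]
  | cons e es ih =>
    intro start
    simp only [List.foldl_cons, List.map_cons]
    rw [ih (start ++ "\n- " ++ e),
      str_join_cons "\n" start (("- " ++ e) :: es.map (fun e => "- " ++ e)) (by simp)]
    cases hes : es.map (fun e => "- " ++ e) with
    | nil =>
      rw [str_join_singleton, str_join_singleton]
      apply String.toList_inj.mp
      simp
    | cons y ys =>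
      rw [str_join_cons "\n" (start ++ "\n- " ++ e) (y :: ys) (by simp),
        str_join_cons "\n" ("- " ++ e) (y :: ys) (by simp)]
      apply String.toList_inj.mp
      simp

-- A's per-section contributions to the flat '\n'-join, written front-to-back
def flatA (d : PySem.Dict String (List String)) : List String → String
  | [] => ""
  | s :: rest =>
    match d.get? s with
    | none => flatA d rest
    | some es =>
      if es.isEmpty then flatA d rest
      else "\n" ++ PySem.Str.join "\n" (("## " ++ pyCapitalize s) :: es.map (fun e => "- " ++ e))
             ++ "\n" ++ flatA d rest

theorem join_foldl_stepA (d : PySem.Dict String (List String)) (secs : List String) :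
    ∀ acc : List String, acc ≠ [] →
      PySem.Str.join "\n" (secs.foldl (stepA d) acc)
        = PySem.Str.join "\n" acc ++ flatA d secs := by
  induction secs with
  | nil => intro acc _; simp [flatA]
  | cons s rest ih =>
    intro acc ha
    simp only [List.foldl_cons]
    cases hget : d.get? s with
    | none =>
      have eA : stepA d acc s = acc := by simp [stepA, hget]
      rw [eA, ih acc ha]
      simp [flatA, hget]
    | some es =>
      by_cases he : es.isEmpty
      · have eA : stepA d acc s = acc := by simp [stepA, hget, he]
        rw [eA, ih acc ha]
        simp [flatA, hget, he]
      · have eA : stepA d acc s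
            = acc ++ ((("## " ++ pyCapitalize s) :: es.map (fun e => "- " ++ e)) ++ [""]) := by
          simp [stepA, hget, he]
        rw [eA, ih _ (by simp)]
        rw [str_join_append "\n" acc _ ha (by simp),
          str_join_append "\n" _ [""] (by simp) (by simp), str_join_singleton]
        simp only [flatA, hget, he, if_false, Bool.false_eq_true]
        simp [String.append_assoc]

-- bridge: shift the newline from before A's contribution to after B's rendering
theorem flatA_renderB (d : PySem.Dict String (List String)) : ∀ secs : List String,
    "\n" ++ flatA d secs = renderB d secs ++ "\n" := by
  intro secs
  induction secs with
  | nil => simp [flatA, renderB]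
  | cons s rest ih =>
    cases hget : d.get? s with
    | none => simp only [flatA, renderB, hget]; exact ih
    | some es =>
      by_cases he : es.isEmpty
      · simp only [flatA, renderB, hget, he, if_true]; exact ih
      · simp only [flatA, renderB, hget, he, if_false, Bool.false_eq_true]
        rw [fold_entries es ("## " ++ pyCapitalize s)]
        apply String.toList_inj.mp
        have ih' := congrArg String.toList ih
        simp only [String.toList_append] at ih' ⊢
        have h1 : ("\n" : String).toList = ['\n'] := by decide
        have h2 : ("\n\n" : String).toList = ['\n', '\n'] := by decide
        rw [h1] at ih'
        rw [h1, h2]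
        simp only [List.append_assoc, List.cons_append, List.nil_append] at ih' ⊢
        rw [ih']

-- ===== VERDICT (by name: the statement is the Claim_ definition above) =====
theorem format_release_notes_spec : Claim_equal_format_release_notes := by
  intro version changes _
  unfold Spec_format_release_notes format_release_notes format_release_notes_alt
  by_cases hc : changes.isEmpty
  · simp [hc]
  · simp only [hc, Bool.false_eq_true, if_false]
    rw [join_foldl_stepA (PySem.Dict.mk changes) ["added", "changed", "fixed", "removed"]
      ["# Release " ++ version ++ "\n"] (by simp), str_join_singleton]
    have h1 : "# Release " ++ version ++ "\n"
        ++ flatA (PySem.Dict.mk changes) ["added", "changed", "fixed", "removed"]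
        = "# Release " ++ version
          ++ ("\n" ++ flatA (PySem.Dict.mk changes) ["added", "changed", "fixed", "removed"]) := by
      simp [String.append_assoc]
    rw [h1, flatA_renderB]
    have h2 : "# Release " ++ version
        ++ (renderB (PySem.Dict.mk changes) ["added", "changed", "fixed", "removed"] ++ "\n")
        = ("# Release " ++ version
          ++ renderB (PySem.Dict.mk changes) ["added", "changed", "fixed", "removed"]) ++ "\n" := by
      simp [String.append_assoc]
    rw [h2, str_strip_append_nl]
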